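-- pv_equiv track=rewrite | github.com/clydemoreno/bloom_quest | trial/checksum.py | calculate_32bit_xor_checksum
-- ===== SOURCE A (Python) =====
-- def calculate_32bit_xor_checksum(data):
--     chunk_size = 32
--     checksum = [0] * 32  # Initialize a 32-bit checksum as a bit array
--
--     for i in range(0, len(data), chunk_size):
--         chunk = data[i:i+chunk_size]
--         if len(chunk) < chunk_size:
--             chunk.extend([0] * (chunk_size - len(chunk)))  # Pad with zeroes
--         chunk_checksum = [bit for bit in chunk]  # Initialize chunk_checksum with chunk bits
--         for _ in range(chunk_size - len(chunk)):
--             chunk_checksum.append(0)  # Pad chunk_checksum with zeroes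
--
--         # XOR the chunk_checksum with the current checksum
--         for j in range(32):
--             checksum[j] ^= chunk_checksum[j]
--     # print ("checksum",checksum)
--     return checksum
-- ===== SOURCE B (Python) =====
-- def calculate_32bit_xor_checksum(data):
--     # Column-wise: bit j of the checksum is the XOR of data[j], data[j+32], data[j+64], ...
--     # No chunking and no padding (padding with zeroes never changes an XOR).
--     n = len(data)
--     result = []
--     for j in range(32):
--         acc = 0
--         for i in range(j, n, 32):
--             acc ^= data[i]
--         result.append(acc)
--     return result
-- ===== Notes on version B (the rewrite author's own statement) =====
-- stated objective: simpler
-- what changed: Replaces A's row-wise chunking with slicing, two padding passes and an XOR-merge loop per chunk by a column-wise traversal: entry j is the XOR of the elements at stride 32 starting at j, so chunking and padding disappear.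
import Mathlib
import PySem

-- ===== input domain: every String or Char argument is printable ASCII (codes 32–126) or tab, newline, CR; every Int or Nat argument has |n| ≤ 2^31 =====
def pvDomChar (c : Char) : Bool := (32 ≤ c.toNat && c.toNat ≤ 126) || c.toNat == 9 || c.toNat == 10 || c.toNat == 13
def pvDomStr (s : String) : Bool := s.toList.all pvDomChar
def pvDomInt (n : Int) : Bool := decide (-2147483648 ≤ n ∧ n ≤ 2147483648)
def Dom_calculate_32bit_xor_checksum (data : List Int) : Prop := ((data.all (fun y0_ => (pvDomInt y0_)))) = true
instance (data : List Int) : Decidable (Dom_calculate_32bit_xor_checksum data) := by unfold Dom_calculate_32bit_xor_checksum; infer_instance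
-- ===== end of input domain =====

-- B computes the checksum column-wise (entry j = XOR of data[j::32]) instead of A's
-- row-wise chunking with padding; same return value on every input (objective: simpler).

-- ===== PORT A =====
def calculate_32bit_xor_checksum (data : List Int) : List Int :=
  let chunk_size : Int := 32
  let checksum : List Int := List.replicate 32 (0 : Int)
  (PySem.List.pyRange 0 (data.length : Int) chunk_size).foldl (fun checksum i =>
    let chunk := PySem.List.slice data (some i) (some (i + chunk_size))
    let chunk := if chunk.length < 32 then chunk ++ List.replicate (32 - chunk.length) (0 : Int) else chunk
    let chunk_checksum := chunk.map (fun bit => bit)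
    let chunk_checksum := (PySem.List.pyRange 0 (chunk_size - (chunk.length : Int)) 1).foldl
      (fun cc _ => cc ++ [(0 : Int)]) chunk_checksum
    (PySem.List.pyRange 0 32 1).foldl (fun cs j =>
      PySem.List.pySetD cs j (PySem.Int.bxor (PySem.List.pyGetD cs j 0) (PySem.List.pyGetD chunk_checksum j 0)))
      checksum) checksum

-- ===== PORT B =====
def calculate_32bit_xor_checksum_alt (data : List Int) : List Int :=
  let n : Int := (data.length : Int)
  (PySem.List.pyRange 0 32 1).foldl (fun result j =>
    result ++ [(PySem.List.pyRange j n 32).foldl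
      (fun acc i => PySem.Int.bxor acc (PySem.List.pyGetD data i 0)) 0]) []

-- ===== PRECONDITION & SPEC =====
def Spec_calculate_32bit_xor_checksum (data : List Int) (out : List Int) : Prop := out = calculate_32bit_xor_checksum_alt data
instance (data : List Int) (out : List Int) : Decidable (Spec_calculate_32bit_xor_checksum data out) := by unfold Spec_calculate_32bit_xor_checksum; infer_instance

-- ===== CLAIM (what is proved, stated in full; the proofs are below) =====
def Claim_equal_calculate_32bit_xor_checksum : Prop := ∀ (data : List Int), Dom_calculate_32bit_xor_checksum data → Spec_calculate_32bit_xor_checksum data (calculate_32bit_xor_checksum data)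

-- ===== LEMMAS AND PROOFS =====

-- the checksum column j as a left fold over the chunks of data (the common abstraction)
def pvS (data : List Int) (j : Nat) (acc : Int) : Int :=
  if h : data = [] then acc
  else pvS (data.drop 32) j (PySem.Int.bxor acc (data.getD j 0))
termination_by data.length
decreasing_by
  simp only [List.length_drop]
  have : data.length ≠ 0 := by simpa [List.length_eq_zero_iff] using h
  omega

theorem pvS_nil (j : Nat) (acc : Int) : pvS [] j acc = acc := by
  rw [pvS]; simp

theorem pvS_cons (data : List Int) (j : Nat) (acc : Int) (h : data ≠ []) :
    pvS data j acc = pvS (data.drop 32) j (PySem.Int.bxor acc (data.getD j 0)) := by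
  rw [pvS]; simp [h]

theorem pvS_out (data : List Int) (j : Nat) (acc : Int) (h : data.length ≤ j) :
    pvS data j acc = acc := by
  by_cases hd : data = []
  · subst hd; exact pvS_nil j acc
  · rw [pvS_cons data j acc hd, List.getD_eq_default _ _ h, PySem.Int.bxor_zero]
    exact pvS_out (data.drop 32) j acc (by simp only [List.length_drop]; omega)
termination_by data.length
decreasing_by
  simp only [List.length_drop]
  have : data.length ≠ 0 := by simpa [List.length_eq_zero_iff] using hd
  omega

-- step-32 ranges
theorem pvRange32_nil (j b : Int) (h : b ≤ j) : PySem.List.pyRange j b 32 = [] := by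
  rw [PySem.List.pyRange_of_pos _ _ (by norm_num)]
  have : ¬ j < b := by omega
  simp [this]

theorem pvRange32_cons (j b : Int) (h : j < b) :
    PySem.List.pyRange j b 32 = j :: PySem.List.pyRange (j + 32) b 32 := by
  rw [PySem.List.pyRange_of_pos _ _ (by norm_num), PySem.List.pyRange_of_pos _ _ (by norm_num)]
  have hQ : (if j < b then ((b - j + 32 - 1) / 32).toNat else 0)
      = (if j + 32 < b then ((b - (j + 32) + 32 - 1) / 32).toNat else 0) + 1 := by
    split_ifs <;> omega
  rw [hQ, List.range_succ_eq_map, List.map_cons, List.map_map]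
  congr 1
  · norm_num
  · apply List.map_congr_left
    intro k _
    simp only [Function.comp_apply, Nat.succ_eq_add_one]
    push_cast
    ring

theorem pvRange32_shift (a b : Int) :
    PySem.List.pyRange (a + 32) b 32 = (PySem.List.pyRange a (b - 32) 32).map (· + 32) := by
  rw [PySem.List.pyRange_of_pos _ _ (by norm_num), PySem.List.pyRange_of_pos _ _ (by norm_num)]
  have hc : (a + 32 < b) ↔ (a < b - 32) := by omega
  by_cases h : a + 32 < b
  · have h' : a < b - 32 := hc.mp h
    simp only [h, h', if_true, List.map_map]
    have : (b - (a + 32) + 32 - 1) = (b - 32 - a + 32 - 1) := by ring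
    rw [this]
    apply List.map_congr_left
    intro k _
    simp only [Function.comp_apply]
    ring
  · have h' : ¬ a < b - 32 := fun hh => h (hc.mpr hh)
    simp [h, h']

-- B's inner loop computes pvS
theorem pvLB (data : List Int) (j : Nat) (acc : Int) :
    (PySem.List.pyRange (j : Int) (data.length : Int) 32).foldl
      (fun acc i => PySem.Int.bxor acc (PySem.List.pyGetD data i 0)) acc = pvS data j acc := by
  by_cases hj : data.length ≤ j
  · rw [pvRange32_nil _ _ (by exact_mod_cast hj), List.foldl_nil, pvS_out data j acc hj]
  · push_neg at hj
    have hd : data ≠ [] := by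
      intro h; subst h; simp at hj
    rw [pvRange32_cons _ _ (by exact_mod_cast hj), List.foldl_cons,
        pvRange32_shift, List.foldl_map, pvS_cons data j acc hd]
    have hget : PySem.List.pyGetD data (j : Int) 0 = data.getD j 0 := by simp
    rw [hget]
    set acc' := PySem.Int.bxor acc (data.getD j 0) with hacc'
    have hcongr : ∀ (b : Int) (x : Int), x ∈ PySem.List.pyRange (j : Int) ((data.length : Int) - 32) 32 →
        PySem.Int.bxor b (PySem.List.pyGetD data (x + 32) 0)
          = PySem.Int.bxor b (PySem.List.pyGetD (data.drop 32) x 0) := by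
      intro b x hx
      have hxge : (j : Int) ≤ x :=
        ((PySem.List.mem_pyRange_iff_of_pos (by norm_num : (0:Int) < 32) x).mp hx).1
      have hx0 : 0 ≤ x := le_trans (by positivity) hxge
      have hx32 : x + 32 = ((x.toNat + 32 : Nat) : Int) := by omega
      have hxc : x = ((x.toNat : Nat) : Int) := by omega
      rw [hx32, hxc, PySem.List.pyGetD_natCast, PySem.List.pyGetD_natCast]
      congr 1
      rw [List.getD_eq_getElem?_getD, List.getD_eq_getElem?_getD, List.getElem?_drop,
          show 32 + x.toNat = x.toNat + 32 from by omega]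
      simp
      rw [max_eq_left hx0]
    rw [PySem.List.foldl_congr_mem _ _ _ _ hcongr]
    by_cases hlen : 32 ≤ data.length
    · have hcast : ((data.length : Int) - 32) = ((data.drop 32).length : Int) := by
        simp only [List.length_drop]; omega
      rw [hcast]
      exact pvLB (data.drop 32) j acc'
    · push_neg at hlen
      have hdrop : data.drop 32 = [] := by
        apply List.drop_eq_nil_of_le; omega
      rw [pvRange32_nil _ _ (by push_cast; omega), List.foldl_nil, hdrop, pvS_nil]
termination_by data.length
decreasing_by
  simp only [List.length_drop]
  have : data.length ≠ 0 := by simpa [List.length_eq_zero_iff] using hd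
  omega

-- A's per-chunk step, named for the proofs (definally equal to port A's loop body)
def pvStep (data : List Int) (cs : List Int) (i : Int) : List Int :=
  let chunk_size : Int := 32
  let chunk := PySem.List.slice data (some i) (some (i + chunk_size))
  let chunk := if chunk.length < 32 then chunk ++ List.replicate (32 - chunk.length) (0 : Int) else chunk
  let chunk_checksum := chunk.map (fun bit => bit)
  let chunk_checksum := (PySem.List.pyRange 0 (chunk_size - (chunk.length : Int)) 1).foldl
    (fun cc _ => cc ++ [(0 : Int)]) chunk_checksum
  (PySem.List.pyRange 0 32 1).foldl (fun cs j =>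
    PySem.List.pySetD cs j (PySem.Int.bxor (PySem.List.pyGetD cs j 0) (PySem.List.pyGetD chunk_checksum j 0))) cs

theorem pvA_eq_fold (data : List Int) :
    calculate_32bit_xor_checksum data
      = (PySem.List.pyRange 0 (data.length : Int) 32).foldl (pvStep data) (List.replicate 32 (0 : Int)) := rfl

-- the effective chunk vector inside pvStep reads back as the raw slice (zero-padded getD)
theorem pvStep_cc (chunk : List Int) (j : Nat) (hj : j < 32) :
    ((PySem.List.pyRange 0 ((32 : Int) - (((if chunk.length < 32 then chunk ++ List.replicate (32 - chunk.length) (0 : Int) else chunk)).length : Int)) 1).foldl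
      (fun cc _ => cc ++ [(0 : Int)])
      ((if chunk.length < 32 then chunk ++ List.replicate (32 - chunk.length) (0 : Int) else chunk).map (fun bit => bit))).getD j 0
    = chunk.getD j 0 := by
  set chunk2 := if chunk.length < 32 then chunk ++ List.replicate (32 - chunk.length) (0 : Int) else chunk with hc2
  have h32 : 32 ≤ chunk2.length := by
    rw [hc2]
    split_ifs with h
    · simp only [List.length_append, List.length_replicate]; omega
    · omega
  have hnil : PySem.List.pyRange 0 ((32 : Int) - (chunk2.length : Int)) 1 = [] := by
    apply PySem.List.pyRange_one_eq_nil; push_cast; omega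
  rw [hnil, List.foldl_nil, List.map_id']
  rw [hc2]
  split_ifs with h
  · rw [List.getD_eq_getElem?_getD, List.getElem?_append]
    split_ifs with h2
    · rw [List.getD_eq_getElem?_getD]
    · rw [List.getD_eq_default _ _ (by omega), List.getElem?_replicate]
      split_ifs <;> rfl
  · rfl

-- one pvStep XORs the (zero-extended) chunk into the checksum, position by position
theorem pvStep_inner (cc : List Int) (m : Nat) (hm : m ≤ 32) (cs : List Int) (hcs : cs.length = 32) :
    ((PySem.List.pyRange 0 (m : Int) 1).foldl (fun cs j =>
        PySem.List.pySetD cs j (PySem.Int.bxor (PySem.List.pyGetD cs j 0) (PySem.List.pyGetD cc j 0))) cs).length = 32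
    ∧ ∀ j : Nat, j < 32 →
      ((PySem.List.pyRange 0 (m : Int) 1).foldl (fun cs j =>
        PySem.List.pySetD cs j (PySem.Int.bxor (PySem.List.pyGetD cs j 0) (PySem.List.pyGetD cc j 0))) cs).getD j 0
      = if j < m then PySem.Int.bxor (cs.getD j 0) (cc.getD j 0) else cs.getD j 0 := by
  induction m with
  | zero =>
    rw [show ((0 : Nat) : Int) = 0 by rfl, PySem.List.pyRange_one_eq_nil (le_refl 0), List.foldl_nil]
    exact ⟨hcs, fun j hj => by simp⟩
  | succ m ih =>
    have ih' := ih (by omega)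
    have hsplit : PySem.List.pyRange 0 ((m + 1 : Nat) : Int) 1
        = PySem.List.pyRange 0 (m : Int) 1 ++ [(m : Int)] := by
      push_cast
      exact PySem.List.pyRange_one_succ_right (by positivity)
    rw [hsplit, List.foldl_append, List.foldl_cons, List.foldl_nil]
    set r := (PySem.List.pyRange 0 (m : Int) 1).foldl (fun cs j =>
      PySem.List.pySetD cs j (PySem.Int.bxor (PySem.List.pyGetD cs j 0) (PySem.List.pyGetD cc j 0))) cs with hr
    have hrlen : r.length = 32 := ih'.1
    have hrget : ∀ j : Nat, j < 32 → r.getD j 0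
        = if j < m then PySem.Int.bxor (cs.getD j 0) (cc.getD j 0) else cs.getD j 0 := ih'.2
    have hgm : PySem.List.pyGetD r (m : Int) 0 = r.getD m 0 := by simp
    have hv : PySem.Int.bxor (PySem.List.pyGetD r ((m : Nat) : Int) 0) (PySem.List.pyGetD cc ((m : Nat) : Int) 0)
        = PySem.Int.bxor (cs.getD m 0) (cc.getD m 0) := by
      rw [hgm, hrget m (by omega), if_neg (lt_irrefl m)]
      congr 1
      simp
    rw [PySem.List.pySetD_natCast, hv]
    refine ⟨by simp [hrlen], fun j hj => ?_⟩
    rw [List.getD_eq_getElem?_getD, List.getElem?_set]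
    by_cases he : m = j
    · subst he
      rw [if_pos rfl, if_pos (by omega), Option.getD_some, if_pos (by omega)]
    · rw [if_neg he, ← List.getD_eq_getElem?_getD, hrget j hj]
      by_cases hjm : j < m
      · rw [if_pos hjm, if_pos (by omega)]
      · rw [if_neg hjm, if_neg (by omega)]

theorem pvStep_getD (data : List Int) (cs : List Int) (i : Int) (hcs : cs.length = 32) :
    (pvStep data cs i).length = 32
    ∧ ∀ j : Nat, j < 32 → (pvStep data cs i).getD j 0
      = PySem.Int.bxor (cs.getD j 0) ((PySem.List.slice data (some i) (some (i + 32))).getD j 0) := by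
  set chunk := PySem.List.slice data (some i) (some (i + 32)) with hchunk
  have h := pvStep_inner
    ((PySem.List.pyRange 0 ((32 : Int) - ((if chunk.length < 32 then chunk ++ List.replicate (32 - chunk.length) (0 : Int) else chunk).length : Int)) 1).foldl
      (fun cc _ => cc ++ [(0 : Int)])
      ((if chunk.length < 32 then chunk ++ List.replicate (32 - chunk.length) (0 : Int) else chunk).map (fun bit => bit)))
    32 (le_refl 32) cs hcs
  have hstep : pvStep data cs i
      = (PySem.List.pyRange 0 ((32 : Nat) : Int) 1).foldl (fun cs j =>
          PySem.List.pySetD cs j (PySem.Int.bxor (PySem.List.pyGetD cs j 0)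
            (PySem.List.pyGetD
              ((PySem.List.pyRange 0 ((32 : Int) - ((if chunk.length < 32 then chunk ++ List.replicate (32 - chunk.length) (0 : Int) else chunk).length : Int)) 1).foldl
                (fun cc _ => cc ++ [(0 : Int)])
                ((if chunk.length < 32 then chunk ++ List.replicate (32 - chunk.length) (0 : Int) else chunk).map (fun bit => bit)))
              j 0))) cs := by
    rfl
  rw [hstep]
  refine ⟨h.1, fun j hj => ?_⟩
  rw [h.2 j hj, if_pos hj, pvStep_cc chunk j hj]

-- A's outer loop (over explicit chunk starts) computes pvS at every position
theorem pvLA (q : Nat) (data : List Int) (cs : List Int) (hcs : cs.length = 32)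
    (hlen : data.length ≤ 32 * q) :
    (((List.range q).map (fun k : Nat => (32 : Int) * (k : Int))).foldl (pvStep data) cs).length = 32
    ∧ ∀ j : Nat, j < 32 →
      (((List.range q).map (fun k : Nat => (32 : Int) * (k : Int))).foldl (pvStep data) cs).getD j 0
        = pvS data j (cs.getD j 0) := by
  induction q generalizing data cs with
  | zero =>
    have hnil : data = [] := by
      rw [← List.length_eq_zero_iff]; omega
    subst hnil
    simp only [List.range_zero, List.map_nil, List.foldl_nil]
    exact ⟨hcs, fun j hj => (pvS_nil j _).symm⟩
  | succ q ih =>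
    rw [List.range_succ_eq_map, List.map_cons, List.foldl_cons, List.map_map]
    have hshift : (fun (cs' : List Int) (k : Nat) =>
          pvStep data cs' (((fun k : Nat => (32 : Int) * (k : Int)) ∘ Nat.succ) k))
        = (fun (cs' : List Int) (k : Nat) => pvStep (data.drop 32) cs' ((32 : Int) * (k : Int))) := by
      funext cs' k
      show pvStep data cs' (32 * ((k : Int) + 1)) = pvStep (data.drop 32) cs' (32 * k)
      simp only [pvStep]
      have hsl : PySem.List.slice data (some (32 * ((k : Int) + 1))) (some (32 * ((k : Int) + 1) + 32))
          = PySem.List.slice (data.drop 32) (some (32 * (k : Int))) (some (32 * (k : Int) + 32)) := by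
        have h1 : (32 * ((k : Int) + 1)) = ((32 * k + 32 : Nat) : Int) := by push_cast; ring
        have h2 : (32 * ((k : Int) + 1) + 32) = ((32 * k + 64 : Nat) : Int) := by push_cast; ring
        have h3 : (32 * (k : Int)) = ((32 * k : Nat) : Int) := by push_cast; ring
        have h4 : (32 * (k : Int) + 32) = ((32 * k + 32 : Nat) : Int) := by push_cast; ring
        rw [h2, h1, h4, h3, PySem.List.slice_natCast, PySem.List.slice_natCast, List.drop_drop]
        congr 1
        · omega
        · congr 1; omega
      rw [hsl]
    rw [List.foldl_map, hshift]
    simp only [Nat.cast_zero, mul_zero]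
    have hcs1 := pvStep_getD data cs 0 hcs
    have ihh := ih (data.drop 32) (pvStep data cs 0) hcs1.1 (by simp only [List.length_drop]; omega)
    rw [List.foldl_map] at ihh
    refine ⟨ihh.1, fun j hj => ?_⟩
    rw [ihh.2 j hj, hcs1.2 j hj]
    have hslice0 : PySem.List.slice data (some 0) (some (0 + 32)) = data.take 32 := by
      have h := PySem.List.slice_natCast (xs := data) (a := 0) (b := 32)
      simpa using h
    rw [hslice0]
    by_cases hd : data = []
    · subst hd
      simp only [List.take_nil, List.drop_nil]
      rw [pvS_nil, pvS_nil]
      simp [PySem.Int.bxor_zero]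
    · rw [pvS_cons data j _ hd]
      congr 1
      congr 1
      rw [List.getD_eq_getElem?_getD, List.getD_eq_getElem?_getD, List.getElem?_take]
      rcases Nat.lt_or_ge j data.length with hlt | hge
      · rw [if_pos (by omega)]
      · rw [List.getElem?_eq_none_iff.mpr (by omega)]
        split_ifs <;> simp

-- A's outer range is exactly the chunk starts
theorem pvOuterA (n : Int) (hn : 0 ≤ n) :
    PySem.List.pyRange 0 n 32
      = (List.range (((n + 31) / 32).toNat)).map (fun k : Nat => (32 : Int) * (k : Int)) := by
  rw [PySem.List.pyRange_of_pos _ _ (by norm_num)]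
  by_cases h : (0 : Int) < n
  · rw [if_pos h, show (n - 0 + 32 - 1) = n + 31 from by ring]
    apply List.map_congr_left
    intro k _
    ring
  · have hn0 : n = 0 := by omega
    subst hn0
    rw [if_neg h]
    rfl

-- ===== VERDICT (by name: the statement is the Claim_ definition above) =====
theorem calculate_32bit_xor_checksum_spec : Claim_equal_calculate_32bit_xor_checksum := by
  intro data _
  unfold Spec_calculate_32bit_xor_checksum
  -- A side
  rw [pvA_eq_fold, pvOuterA (data.length : Int) (by positivity)]
  have hq : data.length ≤ 32 * ((((data.length : Int) + 31) / 32).toNat) := by omega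
  have hA := pvLA ((((data.length : Int) + 31) / 32).toNat) data (List.replicate 32 (0 : Int))
    (by simp) hq
  -- B side
  show _ = (PySem.List.pyRange 0 32 1).foldl (fun result j =>
    result ++ [(PySem.List.pyRange j (data.length : Int) 32).foldl
      (fun acc i => PySem.Int.bxor acc (PySem.List.pyGetD data i 0)) 0]) []
  rw [PySem.List.foldl_append_singleton_eq_map]
  simp only [List.nil_append]
  apply List.ext_getElem
  · rw [hA.1]
    simp [PySem.List.length_pyRange_one]
  · intro j hj1 hj2
    have hj : j < 32 := by
      rw [hA.1] at hj1; exact hj1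
    have hrep : (List.replicate 32 (0 : Int)).getD j 0 = 0 := by
      rw [List.getD_eq_getElem?_getD, List.getElem?_replicate]
      split_ifs <;> rfl
    rw [List.getElem_map, PySem.List.getElem_pyRange_one,
        show (0 : Int) + (j : Int) = ((j : Nat) : Int) from by ring,
        pvLB data j 0, ← List.getD_eq_getElem _ 0 hj1, hA.2 j hj, hrep]
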